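-- pv_equiv track=rewrite | github.com/narasimha807/javaScript_Projects | chinna.py | unique_combinations
-- ===== SOURCE A (Python) =====
-- def unique_combinations(given_words):
--     # Create an empty set to store unique sentences.
--     sentences_set = set()
--
--     # Create a copy of the input list of words.
--     unique_words = given_words.copy()
--
--     # Iterate through each word in the given_words list.
--     for i in given_words:
--         # Remove the current word from the unique_words list to avoid using it in the same sentence.
--         unique_words.remove(i)
--
--         # Create an empty tuple to hold word combinations.
--         tuplex = ()
--
--         # Iterate through each remaining word in the unique_words list.
--         for j in unique_words:
--             # Create a tuple of the two words, with the words sorted in lexicographical order.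
--             tuplex = i, j
--
--             # Add the sorted tuple to the sentences_set.
--             sentences_set.add(tuple(sorted(list(tuplex))))
--
--             # Reset the unique_words list to the original list of words.
--             unique_words = given_words.copy()
--
--
--     # Convert the set of unique sentence tuples to a list and sort it.
--     combination_list = list(sentences_set)
--     combination_list.sort()
--
--     # Return the sorted list of unique sentence tuples.
--     return combination_list
-- ===== SOURCE B (Python) =====
-- def unique_combinations(given_words):
--     # Count occurrences of each word once.
--     counts = {}
--     for w in given_words:
--         counts[w] = counts.get(w, 0) + 1
--     # Distinct words in ascending order.
--     vals = sorted(counts)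
--     # Emit pairs in already-sorted order: for each x, (x, x) if x repeats,
--     # then (x, y) for every larger distinct y.
--     out = []
--     while vals:
--         x = vals[0]
--         vals = vals[1:]
--         if counts[x] >= 2:
--             out.append((x, x))
--         for y in vals:
--             out.append((x, y))
--     return out
-- ===== Notes on version B (the rewrite author's own statement) =====
-- stated objective: faster
-- what changed: Instead of enumerating all ordered pairs of word occurrences (quadratic in list length), inserting each sorted pair into a set and sorting the set at the end, B counts occurrences once, sorts the distinct words, and emits the already-sorted unique pairs directly: (x,x) when x repeats and (x,y) for each pair of distinct words x<y.
import Mathlib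
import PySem

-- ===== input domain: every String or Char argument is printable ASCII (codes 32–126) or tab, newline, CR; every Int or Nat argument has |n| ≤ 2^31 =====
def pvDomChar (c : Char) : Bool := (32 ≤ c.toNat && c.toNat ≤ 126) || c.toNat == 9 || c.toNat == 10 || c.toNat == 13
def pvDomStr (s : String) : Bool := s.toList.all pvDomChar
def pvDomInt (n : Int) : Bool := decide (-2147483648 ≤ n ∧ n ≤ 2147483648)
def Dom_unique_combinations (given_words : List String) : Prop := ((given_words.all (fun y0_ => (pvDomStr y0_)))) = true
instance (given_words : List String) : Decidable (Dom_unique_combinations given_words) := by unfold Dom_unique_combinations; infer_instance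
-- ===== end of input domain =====

-- B replaces A's quadratic pair enumeration over word occurrences (plus a final sort of the
-- de-duplicated pairs) by counting each word once and emitting the pairs of distinct sorted
-- words directly in ascending order; objective: faster on duplicate-heavy input.

-- ===== PORT A =====
-- A's outer loop removes the current word from `unique_words`, the inner loop adds the sorted
-- pair to the set and resets `unique_words` to a copy of `given_words`; the loop state is the
-- pair (sentences_set, unique_words).  `unique_words.remove(i)` always succeeds in A (the list
-- is a fresh copy whenever the next removal happens), so `.getD st.2` is never consulted.
def unique_combinations (given_words : List String) : List (List String) :=
  let res := given_words.foldl
    (fun (st : PySem.Set (List String) × List String) i =>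
      let unique_words := (PySem.List.remove? st.2 i).getD st.2
      unique_words.foldl
        (fun (st2 : PySem.Set (List String) × List String) j =>
          (PySem.Set.add st2.1 (PySem.List.sorted [i, j] (fun x => x)), given_words))
        (st.1, unique_words))
    (PySem.Set.ofList [], given_words)
  PySem.List.sorted res.1 (fun x => x)

-- ===== PORT B =====
-- counts[w] = counts.get(w, 0) + 1 loop of Source B
def pvCountWords (given_words : List String) : PySem.Dict String Int :=
  given_words.foldl (fun d w => d.insert w (d.getD w 0 + 1)) PySem.Dict.empty

-- the `while vals:` loop of Source B: take x = vals[0], drop it, emit (x,x) if repeated, then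
-- (x, y) for the remaining larger values, and continue on the tail
def pvEmit (counts : PySem.Dict String Int) : List String → List (List String)
  | [] => []
  | x :: vals =>
      (if 2 ≤ counts.getD x 0 then [[x, x]] else []) ++ vals.map (fun y => [x, y])
        ++ pvEmit counts vals

def unique_combinations_alt (given_words : List String) : List (List String) :=
  let counts := pvCountWords given_words
  pvEmit counts (PySem.List.sorted counts.keys (fun x => x))

-- ===== PRECONDITION & SPEC =====
def Spec_unique_combinations (given_words : List String) (out : List (List String)) : Prop := out = unique_combinations_alt given_words
instance (given_words : List String) (out : List (List String)) : Decidable (Spec_unique_combinations given_words out) := by unfold Spec_unique_combinations; infer_instance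

-- ===== CLAIM (what is proved, stated in full; the proofs are below) =====
def Claim_equal_unique_combinations : Prop := ∀ (given_words : List String), Dom_unique_combinations given_words → Spec_unique_combinations given_words (unique_combinations given_words)

-- ===== LEMMAS AND PROOFS =====

-- the sorted two-element pair, evaluated
theorem pvSort2_eq (i j : String) :
    PySem.List.sorted [i, j] (fun x => x) = if j < i then [j, i] else [i, j] := by
  simp [PySem.List.sorted_eq_foldl_insertBy, PySem.List.insertBy]

-- lexicographic order on two-element lists of strings
theorem pvPairLt (a b c d : String) :
    ([a, b] : List String) < [c, d] ↔ a < c ∨ (a = c ∧ b < d) := by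
  simp [String.lt_iff_toList_lt, List.cons_lt_cons_iff]

-- ----- A side: the fold computes the set of sorted pairs -----

-- A's set of pairs, stated directly
def pvASet (ws : List String) : PySem.Set (List String) :=
  ws.foldl
    (fun s i => (ws.erase i).foldl (fun s j => s.add (PySem.List.sorted [i, j] (fun x => x))) s)
    (PySem.Set.ofList [])

theorem pvInner_fst (ws : List String) (i : String) :
    ∀ (l : List String) (s : PySem.Set (List String)) (x : List String),
      (l.foldl
        (fun (st2 : PySem.Set (List String) × List String) j =>
          (PySem.Set.add st2.1 (PySem.List.sorted [i, j] (fun x => x)), ws)) (s, x)).1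
      = l.foldl (fun s j => s.add (PySem.List.sorted [i, j] (fun x => x))) s := by
  intro l
  induction l with
  | nil => intro s x; rfl
  | cons a t ih => intro s x; simpa using ih _ _

theorem pvInner_snd (ws : List String) (i : String) :
    ∀ (l : List String) (s : PySem.Set (List String)) (x : List String), l ≠ [] →
      (l.foldl
        (fun (st2 : PySem.Set (List String) × List String) j =>
          (PySem.Set.add st2.1 (PySem.List.sorted [i, j] (fun x => x)), ws)) (s, x)).2 = ws := by
  intro l
  induction l with
  | nil => intro s x h; exact absurd rfl h
  | cons a t ih =>
      intro s x _
      cases t with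
      | nil => rfl
      | cons b u => simpa using ih (s := PySem.Set.add s (PySem.List.sorted [i, a] (fun x => x))) (x := ws) (by simp)

theorem pvOuter (ws : List String) (h2 : 2 ≤ ws.length) :
    ∀ (l : List String), (∀ i ∈ l, i ∈ ws) → ∀ (s : PySem.Set (List String)),
      l.foldl
        (fun (st : PySem.Set (List String) × List String) i =>
          let unique_words := (PySem.List.remove? st.2 i).getD st.2
          unique_words.foldl
            (fun (st2 : PySem.Set (List String) × List String) j =>
              (PySem.Set.add st2.1 (PySem.List.sorted [i, j] (fun x => x)), ws)) (st.1, unique_words))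
        (s, ws)
      = (l.foldl
          (fun s i => (ws.erase i).foldl (fun s j => s.add (PySem.List.sorted [i, j] (fun x => x))) s) s,
         ws) := by
  intro l
  induction l with
  | nil => intro _ s; rfl
  | cons a t ih =>
      intro hsub s
      have ha : a ∈ ws := hsub a (by simp)
      have hrm : PySem.List.remove? ws a = some (ws.erase a) :=
        PySem.List.remove?_eq_some_erase ws a ha
      have hne : ws.erase a ≠ [] := by
        have := List.length_erase_of_mem ha
        intro h; rw [h] at this; simp at this; omega
      simp only [List.foldl_cons, hrm, Option.getD_some]
      have h1 := pvInner_fst ws a (ws.erase a) s (ws.erase a)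
      have h2' := pvInner_snd ws a (ws.erase a) s (ws.erase a) hne
      rw [show (List.foldl
            (fun (st2 : PySem.Set (List String) × List String) j =>
              (PySem.Set.add st2.1 (PySem.List.sorted [a, j] (fun x => x)), ws)) (s, ws.erase a) (ws.erase a))
          = ((ws.erase a).foldl (fun s j => s.add (PySem.List.sorted [a, j] (fun x => x))) s, ws) from
        Prod.ext h1 h2']
      exact ih (fun i hi => hsub i (by simp [hi])) _

theorem pvA_eq_sorted_ASet (ws : List String) (h2 : 2 ≤ ws.length) :
    unique_combinations ws = PySem.List.sorted (pvASet ws) (fun x => x) := by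
  unfold unique_combinations pvASet
  rw [pvOuter ws h2 ws (fun i hi => hi)]

-- membership in A's set
theorem pvMem_inner (i : String) :
    ∀ (l : List String) (s : PySem.Set (List String)) (z : List String),
      z ∈ l.foldl (fun s j => s.add (PySem.List.sorted [i, j] (fun x => x))) s ↔
        z ∈ s ∨ ∃ j ∈ l, z = PySem.List.sorted [i, j] (fun x => x) := by
  intro l
  induction l with
  | nil => simp
  | cons a t ih =>
      intro s z
      rw [List.foldl_cons, ih, PySem.Set.mem_add]
      constructor
      · rintro (( h | h ) | ⟨j, hj, rfl⟩)
        · exact Or.inl h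
        · exact Or.inr ⟨a, by simp, h⟩
        · exact Or.inr ⟨j, by simp [hj], rfl⟩
      · rintro (h | ⟨j, hj, rfl⟩)
        · exact Or.inl (Or.inl h)
        · rcases List.mem_cons.mp hj with rfl | hj
          · exact Or.inl (Or.inr rfl)
          · exact Or.inr ⟨j, hj, rfl⟩

theorem pvMem_ASet (ws z : List String) :
    z ∈ pvASet ws ↔ ∃ i ∈ ws, ∃ j ∈ ws.erase i, z = PySem.List.sorted [i, j] (fun x => x) := by
  have main : ∀ (l : List String) (s : PySem.Set (List String)),
      z ∈ l.foldl (fun s i => (ws.erase i).foldl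
          (fun s j => s.add (PySem.List.sorted [i, j] (fun x => x))) s) s ↔
        z ∈ s ∨ ∃ i ∈ l, ∃ j ∈ ws.erase i, z = PySem.List.sorted [i, j] (fun x => x) := by
    intro l
    induction l with
    | nil => simp
    | cons a t ih =>
        intro s
        rw [List.foldl_cons, ih, pvMem_inner]
        constructor
        · rintro (( h | ⟨j, hj, rfl⟩ ) | ⟨i, hi, j, hj, rfl⟩)
          · exact Or.inl h
          · exact Or.inr ⟨a, by simp, j, hj, rfl⟩
          · exact Or.inr ⟨i, by simp [hi], j, hj, rfl⟩
        · rintro (h | ⟨i, hi, j, hj, rfl⟩)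
          · exact Or.inl (Or.inl h)
          · rcases List.mem_cons.mp hi with rfl | hi
            · exact Or.inl (Or.inr ⟨j, hj, rfl⟩)
            · exact Or.inr ⟨i, hi, j, hj, rfl⟩
  rw [pvASet, main]
  simp [PySem.Set.ofList]

theorem pvNodup_ASet (ws : List String) : (pvASet ws : List (List String)).Nodup := by
  have inner : ∀ (i : String) (l : List String) (s : PySem.Set (List String)), s.Nodup →
      (l.foldl (fun s j => s.add (PySem.List.sorted [i, j] (fun x => x))) s).Nodup := by
    intro i l
    induction l with
    | nil => intro s hs; exact hs
    | cons a t ih => intro s hs; exact ih _ (PySem.Set.nodup_add _ _ hs)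
  have outer : ∀ (l : List String) (s : PySem.Set (List String)), s.Nodup →
      (l.foldl (fun s i => (ws.erase i).foldl
          (fun s j => s.add (PySem.List.sorted [i, j] (fun x => x))) s) s).Nodup := by
    intro l
    induction l with
    | nil => intro s hs; exact hs
    | cons a t ih => intro s hs; exact ih _ (inner _ _ _ hs)
  exact outer ws _ (by simp [PySem.Set.ofList])

-- characterisation of the pairs, independent of the programs
theorem pvPairs_char (ws z : List String) :
    (∃ i ∈ ws, ∃ j ∈ ws.erase i, z = PySem.List.sorted [i, j] (fun x => x)) ↔
      ∃ a b : String, z = [a, b] ∧ a ∈ ws ∧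
        ((b = a ∧ 2 ≤ ws.count a) ∨ (b ∈ ws ∧ a < b)) := by
  constructor
  · rintro ⟨i, hi, j, hj, rfl⟩
    rcases eq_or_ne i j with rfl | hij
    · refine ⟨i, i, ?_, hi, Or.inl ⟨rfl, ?_⟩⟩
      · rw [pvSort2_eq]; simp
      · have h1 : 0 < (ws.erase i).count i := List.count_pos_iff.mpr hj
        have h2 : (ws.erase i).count i = ws.count i - 1 := List.count_erase_self
        omega
    · have hjw : j ∈ ws := List.mem_of_mem_erase hj
      rcases lt_or_gt_of_ne hij with h | h
      · exact ⟨i, j, by rw [pvSort2_eq, if_neg (not_lt_of_gt h)], hi, Or.inr ⟨hjw, h⟩⟩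
      · exact ⟨j, i, by rw [pvSort2_eq, if_pos h], hjw, Or.inr ⟨hi, h⟩⟩
  · rintro ⟨a, b, rfl, ha, ⟨hba, hc⟩ | ⟨hb, hab⟩⟩
    · subst hba
      refine ⟨b, ha, b, ?_, by rw [pvSort2_eq]; simp⟩
      have h2 : (ws.erase b).count b = ws.count b - 1 := List.count_erase_self
      exact List.count_pos_iff.mp (by omega)
    · exact ⟨a, ha, b, List.mem_erase_of_ne (ne_of_gt hab) |>.mpr hb,
        by rw [pvSort2_eq, if_neg (not_lt_of_gt hab)]⟩

-- ----- B side -----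

theorem pvEmit_shape (c : PySem.Dict String Int) :
    ∀ (l : List String), ∀ z ∈ pvEmit c l, ∃ a b : String, z = [a, b] ∧ a ∈ l := by
  intro l
  induction l with
  | nil => simp [pvEmit]
  | cons x t ih =>
      intro z hz
      rw [pvEmit, List.mem_append, List.mem_append] at hz
      rcases hz with (hz | hz) | hz
      · refine ⟨x, x, ?_, by simp⟩
        split_ifs at hz with h
        · simpa using hz
        · simp at hz
      · rcases List.mem_map.mp hz with ⟨y, hy, rfl⟩
        exact ⟨x, y, rfl, by simp⟩
      · rcases ih z hz with ⟨a, b, rfl, ha⟩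
        exact ⟨a, b, rfl, by simp [ha]⟩

theorem pvMem_emit (c : PySem.Dict String Int) :
    ∀ (l : List String), l.Pairwise (· < ·) → ∀ (z : List String),
      (z ∈ pvEmit c l ↔ ∃ a b : String, z = [a, b] ∧ a ∈ l ∧
        ((b = a ∧ 2 ≤ c.getD a 0) ∨ (b ∈ l ∧ a < b))) := by
  intro l
  induction l with
  | nil => simp [pvEmit]
  | cons x t ih =>
      intro hp z
      rcases List.pairwise_cons.mp hp with ⟨hx, ht⟩
      rw [pvEmit, List.mem_append, List.mem_append, ih ht]
      constructor
      · rintro ((hz | hz) | ⟨a, b, rfl, ha, hd⟩)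
        · split_ifs at hz with h
          · simp only [List.mem_singleton] at hz
            exact ⟨x, x, hz, by simp, Or.inl ⟨rfl, h⟩⟩
          · simp at hz
        · rcases List.mem_map.mp hz with ⟨y, hy, rfl⟩
          exact ⟨x, y, rfl, by simp, Or.inr ⟨by simp [hy], hx y hy⟩⟩
        · refine ⟨a, b, rfl, by simp [ha], ?_⟩
          rcases hd with ⟨hba, hc⟩ | ⟨hb, hab⟩
          · exact Or.inl ⟨hba, hc⟩
          · exact Or.inr ⟨by simp [hb], hab⟩
      · rintro ⟨a, b, rfl, ha, hd⟩
        rcases List.mem_cons.mp ha with rfl | ha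
        · rcases hd with ⟨hba, hc⟩ | ⟨hb, hab⟩
          · subst hba
            exact Or.inl (Or.inl (by simp [if_pos hc]))
          · have hbt : b ∈ t := by
              rcases List.mem_cons.mp hb with rfl | hbt
              · exact absurd hab (lt_irrefl _)
              · exact hbt
            exact Or.inl (Or.inr (List.mem_map.mpr ⟨b, hbt, rfl⟩))
        · refine Or.inr ⟨a, b, rfl, ha, ?_⟩
          rcases hd with ⟨hba, hc⟩ | ⟨hb, hab⟩
          · exact Or.inl ⟨hba, hc⟩
          · have hbt : b ∈ t := by
              rcases List.mem_cons.mp hb with hbx | hbt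
              · exact absurd (hbx ▸ hab) (not_lt_of_gt (hx a ha))
              · exact hbt
            exact Or.inr ⟨hbt, hab⟩

theorem pvPairwise_emit (c : PySem.Dict String Int) :
    ∀ (l : List String), l.Pairwise (· < ·) → (pvEmit c l).Pairwise (· < ·) := by
  intro l
  induction l with
  | nil => simp [pvEmit]
  | cons x t ih =>
      intro hp
      rcases List.pairwise_cons.mp hp with ⟨hx, ht⟩
      rw [pvEmit]
      have hshape : ∀ z ∈ pvEmit c t, ∃ a b : String, z = [a, b] ∧ a ∈ t :=
        pvEmit_shape c t
      apply List.pairwise_append.mpr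
      refine ⟨?_, ih ht, ?_⟩
      · apply List.pairwise_append.mpr
        refine ⟨?_, ?_, ?_⟩
        · split_ifs <;> simp
        · refine List.Pairwise.map _ ?_ ht
          intro a b hab
          exact (pvPairLt x a x b).mpr (Or.inr ⟨rfl, hab⟩)
        · intro z1 h1 z2 h2
          have hz1 : z1 = [x, x] := by
            split_ifs at h1 with h
            · simpa using h1
            · simp at h1
          subst hz1
          rcases List.mem_map.mp h2 with ⟨y, hy, rfl⟩
          exact (pvPairLt x x x y).mpr (Or.inr ⟨rfl, hx y hy⟩)
      · intro z1 h1 z2 h2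
        rcases hshape z2 h2 with ⟨a, b, rfl, ha⟩
        rcases List.mem_append.mp h1 with h1 | h1
        · have hz1 : z1 = [x, x] := by
            split_ifs at h1 with h
            · simpa using h1
            · simp at h1
          subst hz1
          exact (pvPairLt x x a b).mpr (Or.inl (hx a ha))
        · rcases List.mem_map.mp h1 with ⟨y, hy, rfl⟩
          exact (pvPairLt x y a b).mpr (Or.inl (hx a ha))

-- the two (definitionally equal) order instances on List String that elaboration picks
theorem pvSorted_inst (xs : List (List String)) :
    @PySem.List.sorted (List String) (List String) List.instLT (fun a b => a.decidableLT b)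
        xs (fun x => x) false
      = @PySem.List.sorted (List String) (List String) List.instLinearOrder.toLT
        LinearOrder.toDecidableLT xs (fun x => x) false := by
  have h : (fun (a b : List String) => a.decidableLT b)
      = (@LinearOrder.toDecidableLT (List String) List.instLinearOrder) := by
    funext a b; exact Subsingleton.elim _ _
  rw [h]

theorem pvAlt_eq (ws : List String) :
    unique_combinations_alt ws =
      pvEmit (PySem.Dict.counter ws) (PySem.List.sorted (PySem.Set.ofList ws) (fun x => x)) := by
  have hc : pvCountWords ws = PySem.Dict.counter ws :=
    PySem.Dict.foldl_insert_getD_add_one_eq_counter ws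
  rw [unique_combinations_alt, hc, PySem.Dict.keys_counter]

theorem pvMain (ws : List String) (h2 : 2 ≤ ws.length) :
    unique_combinations ws = unique_combinations_alt ws := by
  rw [pvA_eq_sorted_ASet ws h2, pvAlt_eq]
  have hpw : (PySem.List.sorted (PySem.Set.ofList ws) (fun x => x)).Pairwise (· < ·) :=
    PySem.List.sorted_ofList_pairwise_lt ws
  have hemitpw := pvPairwise_emit (PySem.Dict.counter ws) _ hpw
  rw [pvSorted_inst]
  refine PySem.List.sorted_eq_of_perm_of_pairwise_lt (pvASet ws) _ (fun x => x) ?_ ?_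
  · rw [List.perm_ext_iff_of_nodup (hemitpw.imp (fun h => ne_of_lt h)) (pvNodup_ASet ws)]
    intro z
    rw [pvMem_emit _ _ hpw, pvMem_ASet, pvPairs_char]
    constructor
    · rintro ⟨a, b, rfl, ha, hd⟩
      have ha' : a ∈ ws := by
        rw [PySem.List.mem_sorted, PySem.Set.mem_ofList] at ha; exact ha
      refine ⟨a, b, rfl, ha', ?_⟩
      rcases hd with ⟨hba, hc⟩ | ⟨hb, hab⟩
      · refine Or.inl ⟨hba, ?_⟩
        rw [PySem.Dict.getD_counter] at hc
        exact_mod_cast hc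
      · refine Or.inr ⟨?_, hab⟩
        rw [PySem.List.mem_sorted, PySem.Set.mem_ofList] at hb; exact hb
    · rintro ⟨a, b, rfl, ha, hd⟩
      have ha' : a ∈ PySem.List.sorted (PySem.Set.ofList ws) (fun x => x) := by
        rw [PySem.List.mem_sorted, PySem.Set.mem_ofList]; exact ha
      refine ⟨a, b, rfl, ha', ?_⟩
      rcases hd with ⟨hba, hc⟩ | ⟨hb, hab⟩
      · refine Or.inl ⟨hba, ?_⟩
        rw [PySem.Dict.getD_counter]
        exact_mod_cast hc
      · refine Or.inr ⟨?_, hab⟩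
        rw [PySem.List.mem_sorted, PySem.Set.mem_ofList]; exact hb
  · exact hemitpw

theorem pvSingleton (a : String) : unique_combinations [a] = unique_combinations_alt [a] := by
  have hA : unique_combinations [a] = [] := by
    unfold unique_combinations
    simp only [List.foldl_cons, List.foldl_nil, PySem.List.remove?_cons_self, Option.getD_some]
    rfl
  have h3 : (PySem.Dict.counter [a]).getD a 0 = (1 : Int) := by
    simp [PySem.Dict.getD_counter]
  have hB : unique_combinations_alt [a] = [] := by
    rw [pvAlt_eq]
    have hset : PySem.Set.ofList [a] = [a] := rfl
    have h2 : PySem.List.sorted ([a] : List String) (fun x : String => x) = [a] :=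
      PySem.List.sorted_eq_self_of_pairwise _ _ (by simp)
    rw [hset, h2]
    simp [pvEmit, h3]
  rw [hA, hB]

-- ===== VERDICT (by name: the statement is the Claim_ definition above) =====
theorem unique_combinations_spec : Claim_equal_unique_combinations := by
  intro ws _
  unfold Spec_unique_combinations
  match ws with
  | [] => rfl
  | [a] => exact pvSingleton a
  | a :: b :: t => exact pvMain (a :: b :: t) (by simp)
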